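-- pv_equiv track=rewrite | github.com/gilad-rubin/hypergraph | tests/viz/test_parity.py | _all_expansion_states
-- ===== SOURCE A (Python) =====
-- from itertools import product
--
-- def _all_expansion_states(ir_dict: dict) -> list[dict]:
--     """Enumerate the relevant subset of expansion states.
--
--     Full Cartesian on `expandable_nodes` is fine for our test fixtures —
--     they top out at 3 expandable containers (8 states). We rely on
--     test_parity_smoke skipping the largest fixtures if needed.
--     """
--     expandable = list(ir_dict.get("expandable_nodes", []))
--     states: list[dict] = []
--     for bits in product([False, True], repeat=len(expandable)):
--         states.append(dict(zip(expandable, bits, strict=True)))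
--     if not states:
--         states = [{}]
--     return states
-- ===== SOURCE B (Python) =====
-- def _all_expansion_states(ir_dict: dict) -> list[dict]:
--     """Incremental doubling: extend each partial state with False then True
--     for every expandable node, instead of calling itertools.product."""
--     states: list[dict] = [{}]
--     for node in ir_dict.get("expandable_nodes", []):
--         states = [{**s, node: b} for s in states for b in (False, True)]
--     return states
-- ===== Notes on version B (the rewrite author's own statement) =====
-- stated objective: alternative
-- what changed: B replaces the itertools.product enumeration plus dict(zip(...)) per tuple (and the dead empty-guard) with incremental doubling: starting from a single empty state, each expandable node maps every partial state to its False and True extensions.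
import Mathlib
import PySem

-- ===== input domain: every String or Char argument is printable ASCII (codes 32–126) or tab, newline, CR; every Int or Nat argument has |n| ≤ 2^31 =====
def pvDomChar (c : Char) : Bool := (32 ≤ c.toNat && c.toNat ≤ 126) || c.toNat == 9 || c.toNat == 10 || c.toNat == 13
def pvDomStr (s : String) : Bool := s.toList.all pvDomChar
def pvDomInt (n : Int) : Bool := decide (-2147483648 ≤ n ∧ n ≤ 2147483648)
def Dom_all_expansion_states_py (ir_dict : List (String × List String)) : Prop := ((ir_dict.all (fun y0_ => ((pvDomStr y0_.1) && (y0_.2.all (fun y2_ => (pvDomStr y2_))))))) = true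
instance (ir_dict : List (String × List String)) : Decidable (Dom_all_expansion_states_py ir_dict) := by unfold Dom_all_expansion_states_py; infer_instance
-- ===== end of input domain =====

-- ===== PORT A =====
-- Python-dict primitives shared by both ports (exact Python semantics):
-- dict.get(k, default) on an association list = value of the first matching key, else default
def pvGet (ir : List (String × List String)) (k : String) (dflt : List String) : List String :=
  ((ir.find? (fun p => p.1 == k)).map (·.2)).getD dflt
-- d[k] = v : overwrite the first matching key in place, else append
def pvSet (d : List (String × Bool)) (k : String) (v : Bool) : List (String × Bool) :=
  if d.any (fun p => p.1 == k) then d.map (fun p => if p.1 == k then (k, v) else p)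
  else d ++ [(k, v)]
-- itertools.product([False, True], repeat=n): last position varies fastest
def pvProdBits : Nat → List (List Bool)
  | 0 => [[]]
  | n + 1 => [false, true].flatMap (fun b => (pvProdBits n).map (fun bs => b :: bs))

-- literal port of A: product over len(expandable), dict(zip(...)) per tuple, dead empty-guard.
-- (zip(..., strict=True) never raises here: every bits tuple has length = len(expandable), so List.zip is exact.)
def all_expansion_states_py (ir_dict : List (String × List String)) : List (List (String × Bool)) :=
  let expandable := pvGet ir_dict "expandable_nodes" []
  let states := (pvProdBits expandable.length).map
    (fun bits => (expandable.zip bits).foldl (fun d kb => pvSet d kb.1 kb.2) [])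
  if states = [] then [[]] else states

-- ===== PORT B =====
-- port of B: incremental doubling from the seed [{}]
def all_expansion_states_py_alt (ir_dict : List (String × List String)) : List (List (String × Bool)) :=
  (pvGet ir_dict "expandable_nodes" []).foldl
    (fun sts node => sts.flatMap (fun s => [pvSet s node false, pvSet s node true])) [[]]

-- ===== PRECONDITION & SPEC =====
def Spec_all_expansion_states_py (ir_dict : List (String × List String)) (out : List (List (String × Bool))) : Prop := out = all_expansion_states_py_alt ir_dict
instance (ir_dict : List (String × List String)) (out : List (List (String × Bool))) : Decidable (Spec_all_expansion_states_py ir_dict out) := by unfold Spec_all_expansion_states_py; infer_instance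

-- ===== CLAIM (what is proved, stated in full; the proofs are below) =====
def Claim_equal_all_expansion_states_py : Prop := ∀ (ir_dict : List (String × List String)), Dom_all_expansion_states_py ir_dict → Spec_all_expansion_states_py ir_dict (all_expansion_states_py ir_dict)

-- ===== LEMMAS AND PROOFS =====

lemma pvProdBits_ne_nil (n : Nat) : pvProdBits n ≠ [] := by
  cases n with
  | zero => simp [pvProdBits]
  | succ m =>
    simp only [pvProdBits, List.flatMap_cons, List.flatMap_nil, List.append_nil, ne_eq,
      List.append_eq_nil_iff, List.map_eq_nil_iff]
    intro h
    exact pvProdBits_ne_nil m h.1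

-- core invariant: the doubling fold over keys ks, started from any list L of partial dicts,
-- equals flat-mapping over L the product-style enumeration seeded at each partial dict.
lemma doubling_eq_product (ks : List String) (L : List (List (String × Bool))) :
    ks.foldl (fun sts node => sts.flatMap (fun s => [pvSet s node false, pvSet s node true])) L
      = L.flatMap (fun d => (pvProdBits ks.length).map
          (fun bits => (ks.zip bits).foldl (fun d kb => pvSet d kb.1 kb.2) d)) := by
  induction ks generalizing L with
  | nil => simp [pvProdBits]
  | cons k ks ih =>
    rw [List.foldl_cons, ih]
    rw [List.flatMap_assoc]
    simp only [List.length_cons, pvProdBits, List.flatMap_cons,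
      List.flatMap_nil, List.append_nil]
    congr 1
    funext d
    rw [List.map_append, List.map_map, List.map_map]
    congr 1

theorem all_expansion_states_py_spec' (ir_dict : List (String × List String)) :
    all_expansion_states_py ir_dict = all_expansion_states_py_alt ir_dict := by
  unfold all_expansion_states_py all_expansion_states_py_alt
  rw [doubling_eq_product]
  simp only [List.flatMap_cons, List.flatMap_nil, List.append_nil]
  rw [if_neg]
  intro h
  exact pvProdBits_ne_nil _ (List.map_eq_nil_iff.mp h)

-- ===== VERDICT (by name: the statement is the Claim_ definition above) =====
theorem all_expansion_states_py_spec : Claim_equal_all_expansion_states_py := by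
  intro ir _
  exact all_expansion_states_py_spec' ir
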